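-- pv_equiv track=rewrite | github.com/raeez/chiral-bar-cobar | compute/lib/cy_cluster_mutation_engine.py | positive_roots_A_n
-- ===== SOURCE A (Python) =====
-- from typing import Dict, FrozenSet, List, Optional, Set, Tuple
--
-- def positive_roots_A_n(n: int) -> List[Tuple[int, ...]]:
--     """Positive roots of A_n: e_i - e_j for 1 <= i < j <= n+1.
--
--     Represented as vectors in Z^n (simple root basis).
--     alpha_{i,j} = e_i + e_{i+1} + ... + e_{j-1} for i < j.
--     """
--     roots = []
--     for i in range(n):
--         root = [0] * n
--         for j in range(i, n):
--             root[j] = 1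
--             roots.append(tuple(root[:]))
--     return roots
-- ===== SOURCE B (Python) =====
-- def positive_roots_A_n(n):
--     """Positive roots of A_n by bottom-up dynamic programming on the rank.
--
--     For each rank m = 1..n, the roots of A_m are the prefix vectors
--     1^(j+1) 0^(m-1-j) (row i = 0) followed by the roots of A_(m-1) with a
--     zero prepended.  Produces the same order as the nested-loop enumeration.
--     """
--     roots = []
--     for m in range(1, n + 1):
--         row0 = [(1,) * (j + 1) + (0,) * (m - 1 - j) for j in range(m)]
--         roots = row0 + [(0,) + r for r in roots]
--     return roots
-- ===== Notes on version B (the rewrite author's own statement) =====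
-- stated objective: alternative
-- what changed: Replaces the doubly nested loop over a shared mutable running root by bottom-up dynamic programming on the rank: the roots of A_m are built for m = 1..n, each stage consisting of fresh prefix vectors from replicate blocks followed by the previous stage's roots with a zero prepended.
import Mathlib
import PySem

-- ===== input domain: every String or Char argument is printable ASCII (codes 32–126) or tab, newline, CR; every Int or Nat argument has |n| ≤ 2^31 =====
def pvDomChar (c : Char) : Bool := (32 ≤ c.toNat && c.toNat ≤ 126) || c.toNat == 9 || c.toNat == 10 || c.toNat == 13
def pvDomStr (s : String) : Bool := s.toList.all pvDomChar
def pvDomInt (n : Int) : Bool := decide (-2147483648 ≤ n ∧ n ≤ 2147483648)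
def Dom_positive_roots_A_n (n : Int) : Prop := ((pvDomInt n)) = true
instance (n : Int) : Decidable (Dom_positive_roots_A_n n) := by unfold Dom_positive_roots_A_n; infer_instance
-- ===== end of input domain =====

-- B replaces A's nested loops over a shared mutable running root by bottom-up
-- dynamic programming on the rank: roots of A_m for m = 1..n, each stage from
-- replicate blocks plus the previous stage's roots with a 0 prepended
-- (objective: alternative decomposition).

-- ===== PORT A =====
-- literal transliteration: outer loop over i, inner loop over j mutating one root
-- (root[j] = 1 via pySetD; j is always a valid nonnegative index here) and appending a copy
def positive_roots_A_n (n : Int) : List (List Int) :=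
  (PySem.List.pyRange 0 n 1).foldl
    (fun roots i =>
      ((PySem.List.pyRange i n 1).foldl
        (fun (st : List Int × List (List Int)) j =>
          let r := PySem.List.pySetD st.1 j 1
          (r, st.2 ++ [r]))
        (List.replicate n.toNat 0, roots)).2)
    []

-- ===== PORT B =====
-- literal transliteration of Source B's bottom-up loop over m = 1..n
def positive_roots_A_n_alt (n : Int) : List (List Int) :=
  (PySem.List.pyRange 1 (n + 1) 1).foldl
    (fun roots m =>
      ((PySem.List.pyRange 0 m 1).map
        (fun j => List.replicate (j + 1).toNat 1 ++ List.replicate (m - 1 - j).toNat 0))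
      ++ roots.map (fun r => 0 :: r))
    []

-- ===== PRECONDITION & SPEC =====
def Spec_positive_roots_A_n (n : Int) (out : List (List Int)) : Prop := out = positive_roots_A_n_alt n
instance (n : Int) (out : List (List Int)) : Decidable (Spec_positive_roots_A_n n out) := by unfold Spec_positive_roots_A_n; infer_instance

-- ===== CLAIM (what is proved, stated in full; the proofs are below) =====
def Claim_equal_positive_roots_A_n : Prop := ∀ (n : Int), Dom_positive_roots_A_n n → Spec_positive_roots_A_n n (positive_roots_A_n n)

-- ===== LEMMAS AND PROOFS =====

-- the recursion underlying B's bottom-up loop: pvRec n = roots of A_n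
def pvRec (n : Int) : List (List Int) :=
  if _h : n ≤ 0 then []
  else
    ((PySem.List.pyRange 0 n 1).map
      (fun j => List.replicate (j + 1).toNat 1 ++ List.replicate (n - 1 - j).toNat 0))
    ++ (pvRec (n - 1)).map (fun r => 0 :: r)
termination_by n.toNat
decreasing_by omega

-- the indicator vector of the interval [i, j] inside range(n)
def pvInd (n i j : Int) : List Int :=
  (PySem.List.pyRange 0 n 1).map (fun k => if i ≤ k ∧ k ≤ j then (1 : Int) else 0)

lemma pvInd_empty (n i : Int) : pvInd n i (i - 1) = List.replicate n.toNat 0 := by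
  unfold pvInd
  have h : ∀ k : Int, (if i ≤ k ∧ k ≤ i - 1 then (1 : Int) else 0) = 0 := by
    intro k; rw [if_neg]; omega
  calc (PySem.List.pyRange 0 n 1).map (fun k => if i ≤ k ∧ k ≤ i - 1 then (1 : Int) else 0)
      = (PySem.List.pyRange 0 n 1).map (fun _ => (0 : Int)) := by
        exact List.map_congr_left (fun k _ => h k)
    _ = List.replicate (PySem.List.pyRange 0 n 1).length 0 := by
        simp [List.map_const']
    _ = List.replicate n.toNat 0 := by
        rw [PySem.List.length_pyRange_one]; norm_num

lemma pvInd_set (n i j : Int) (hij : i ≤ j) (hj0 : 0 ≤ j) :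
    PySem.List.pySetD (pvInd n i (j - 1)) j 1 = pvInd n i j := by
  unfold pvInd
  rw [PySem.List.pySetD_of_nonneg _ _ hj0]
  apply List.ext_getElem
  · simp
  · intro k hk1 hk2
    rw [List.getElem_set]
    simp only [List.getElem_map, PySem.List.getElem_pyRange_one]
    have hkn : (k : Int) < n := by
      have := hk2
      simp [PySem.List.length_pyRange_one] at this
      omega
    by_cases hkj : j.toNat = k
    · rw [if_pos hkj]
      rw [if_pos ⟨by omega, by omega⟩]
    · rw [if_neg hkj]
      have hne : (0 : Int) + (k : Int) ≠ j := by omega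
      by_cases h1 : i ≤ (0 : Int) + k ∧ (0 : Int) + k ≤ j - 1
      · rw [if_pos h1, if_pos ⟨h1.1, by omega⟩]
      · rw [if_neg h1, if_neg (by omega)]

-- inner-loop invariant: starting from the indicator of [i, j-1], folding over range(j, n)
-- appends exactly the indicators of [i, j'], j' = j .. n-1
lemma pvInner (n i : Int) : ∀ (m : Nat) (j : Int), i ≤ j → 0 ≤ j → (n - j).toNat = m →
    ∀ (r : List (List Int)),
    ((PySem.List.pyRange j n 1).foldl
      (fun (st : List Int × List (List Int)) j' =>
        let x := PySem.List.pySetD st.1 j' 1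
        (x, st.2 ++ [x]))
      (pvInd n i (j - 1), r)).2
    = r ++ (PySem.List.pyRange j n 1).map (fun j' => pvInd n i j') := by
  intro m
  induction m with
  | zero =>
    intro j _ _ hm r
    have hnj : n ≤ j := by omega
    rw [PySem.List.pyRange_one_eq_nil hnj]
    simp
  | succ m ih =>
    intro j hij hj0 hm r
    have hjn : j < n := by omega
    rw [PySem.List.pyRange_one_cons hjn]
    simp only [List.foldl_cons, List.map_cons]
    rw [pvInd_set n i j hij hj0]
    calc ((PySem.List.pyRange (j+1) n 1).foldl
            (fun (st : List Int × List (List Int)) j' =>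
              let x := PySem.List.pySetD st.1 j' 1
              (x, st.2 ++ [x]))
            (pvInd n i j, r ++ [pvInd n i j])).2
        = ((PySem.List.pyRange (j+1) n 1).foldl
            (fun (st : List Int × List (List Int)) j' =>
              let x := PySem.List.pySetD st.1 j' 1
              (x, st.2 ++ [x]))
            (pvInd n i ((j+1) - 1), r ++ [pvInd n i j])).2 := by
          norm_num
      _ = (r ++ [pvInd n i j]) ++ (PySem.List.pyRange (j+1) n 1).map (fun j' => pvInd n i j') := by
          exact ih (j+1) (by omega) (by omega) (by omega) _
      _ = r ++ (pvInd n i j :: (PySem.List.pyRange (j+1) n 1).map (fun j' => pvInd n i j')) := by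
          simp

-- A's result, characterised as a flat enumeration of interval indicators
lemma pvA_eq_flatMap (n : Int) :
    positive_roots_A_n n
      = (PySem.List.pyRange 0 n 1).flatMap
          (fun i => (PySem.List.pyRange i n 1).map (fun j => pvInd n i j)) := by
  unfold positive_roots_A_n
  rw [PySem.List.foldl_congr_mem
    (g := fun roots i => roots ++ (PySem.List.pyRange i n 1).map (fun j' => pvInd n i j'))]
  · rw [PySem.List.foldl_append_eq_flatMap]
    simp only [List.nil_append]
  · intro acc i hi
    have hi0 : 0 ≤ i := ((PySem.List.mem_pyRange_one).1 hi).1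
    rw [← pvInd_empty n i]
    exact pvInner n i (n - i).toNat i le_rfl hi0 rfl acc

-- row i = 0: the indicator of [0, j] is a block of ones followed by zeros
lemma pvInd_zero_row (n j : Int) (hj0 : 0 ≤ j) (hjn : j < n) :
    pvInd n 0 j = List.replicate (j + 1).toNat 1 ++ List.replicate (n - 1 - j).toNat 0 := by
  unfold pvInd
  apply List.ext_getElem
  · simp [PySem.List.length_pyRange_one]; omega
  · intro k hk1 hk2
    have hkn : (k : Int) < n := by
      simp [PySem.List.length_pyRange_one] at hk1; omega
    simp only [List.getElem_map, PySem.List.getElem_pyRange_one]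
    by_cases hkj : k < (j + 1).toNat
    · rw [List.getElem_append_left (by simpa using hkj)]
      rw [List.getElem_replicate, if_pos ⟨by omega, by omega⟩]
    · rw [List.getElem_append_right (by simpa using hkj)]
      rw [List.getElem_replicate, if_neg (by omega)]

-- rows i ≥ 1: the indicator of [i, j] in Z^n is 0 followed by that of [i-1, j-1] in Z^(n-1)
-- shifting a range by one: range(a+1, b) is range(a, b-1) with every element bumped
lemma pvRange_shift (a b : Int) :
    PySem.List.pyRange (a + 1) b 1 = (PySem.List.pyRange a (b - 1) 1).map (fun x => x + 1) := by
  rw [PySem.List.pyRange_one, PySem.List.pyRange_one]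
  have h : (b - (a + 1)).toNat = (b - 1 - a).toNat := by omega
  rw [h, List.map_map]
  apply List.map_congr_left
  intro k _
  simp only [Function.comp_apply]
  omega

lemma pvInd_shift (n i j : Int) (hi : 1 ≤ i) (hn : 0 < n) :
    pvInd n i j = 0 :: pvInd (n - 1) (i - 1) (j - 1) := by
  unfold pvInd
  rw [PySem.List.pyRange_one_cons hn]
  simp only [List.map_cons]
  congr 1
  · exact if_neg (by omega)
  · rw [pvRange_shift 0 n, List.map_map]
    apply List.map_congr_left
    intro k _
    simp only [Function.comp_apply]
    by_cases h : i - 1 ≤ k ∧ k ≤ j - 1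
    · rw [if_pos (by omega : i ≤ k + 1 ∧ k + 1 ≤ j), if_pos h]
    · rw [if_neg (by omega : ¬ (i ≤ k + 1 ∧ k + 1 ≤ j)), if_neg h]

-- main induction: the flat enumeration equals the rank recursion
lemma pvFlat_eq_rec : ∀ (m : Nat) (n : Int), n.toNat = m →
    (PySem.List.pyRange 0 n 1).flatMap
        (fun i => (PySem.List.pyRange i n 1).map (fun j => pvInd n i j))
      = pvRec n := by
  intro m
  induction m with
  | zero =>
    intro n hm
    have hn : n ≤ 0 := by omega
    rw [PySem.List.pyRange_one_eq_nil hn, pvRec, dif_pos hn]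
    rfl
  | succ m ih =>
    intro n hm
    have hn : 0 < n := by omega
    rw [pvRec, dif_neg (by omega : ¬ n ≤ 0)]
    conv_lhs => rw [PySem.List.pyRange_one_cons hn]
    rw [List.flatMap_cons]
    congr 1
    · -- row 0
      apply List.map_congr_left
      intro j hj
      obtain ⟨hj0, hjn⟩ := PySem.List.mem_pyRange_one.1 hj
      exact pvInd_zero_row n j hj0 hjn
    · -- remaining rows: shift down to A_(n-1)
      rw [← ih (n - 1) (by omega)]
      rw [pvRange_shift 0 n, List.flatMap_map, List.map_flatMap]
      simp only [List.flatMap_def]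
      refine congrArg List.flatten (List.map_congr_left ?_)
      intro i hi
      obtain ⟨hi0, hin⟩ := PySem.List.mem_pyRange_one.1 hi
      rw [pvRange_shift i n, List.map_map, List.map_map]
      apply List.map_congr_left
      intro j hj
      obtain ⟨hji, hjn⟩ := PySem.List.mem_pyRange_one.1 hj
      simp only [Function.comp_apply]
      rw [pvInd_shift n (i + 1) (j + 1) (by omega) hn]
      norm_num

-- B's foldl accumulates exactly the rank recursion
lemma pvFold_eq_rec : ∀ (m : Nat) (n : Int), n.toNat = m →
    positive_roots_A_n_alt n = pvRec n := by
  intro m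
  induction m with
  | zero =>
    intro n hm
    have hn : n ≤ 0 := by omega
    unfold positive_roots_A_n_alt
    rw [PySem.List.pyRange_one_eq_nil (by omega : n + 1 ≤ 1), pvRec, dif_pos hn]
    rfl
  | succ m ih =>
    intro n hm
    have hn : 0 < n := by omega
    unfold positive_roots_A_n_alt
    rw [show n + 1 = (n - 1 + 1) + 1 by ring,
        PySem.List.pyRange_one_succ_right (by omega : (1 : Int) ≤ n - 1 + 1),
        List.foldl_append, List.foldl_cons, List.foldl_nil]
    have hstep : (PySem.List.pyRange 1 (n - 1 + 1) 1).foldl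
        (fun roots m =>
          ((PySem.List.pyRange 0 m 1).map
            (fun j => List.replicate (j + 1).toNat 1 ++ List.replicate (m - 1 - j).toNat 0))
          ++ roots.map (fun r => 0 :: r))
        [] = pvRec (n - 1) := by
      have := ih (n - 1) (by omega)
      unfold positive_roots_A_n_alt at this
      exact this
    rw [hstep]
    conv_rhs => rw [pvRec]
    rw [dif_neg (by omega : ¬ n ≤ 0)]
    norm_num

-- ===== VERDICT (by name: the statement is the Claim_ definition above) =====
theorem positive_roots_A_n_spec : Claim_equal_positive_roots_A_n := by
  intro n _
  unfold Spec_positive_roots_A_n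
  rw [pvA_eq_flatMap, pvFlat_eq_rec n.toNat n rfl, pvFold_eq_rec n.toNat n rfl]
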